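-- pv_equiv track=rewrite | github.com/Udeibom/Learnable-test | Rarest.py | nth_most_rare
-- ===== SOURCE A (Python) =====
-- def nth_most_rare(lst, n):
--     # Create a dictionary to store the frequency of each element
--     frequency_dict = {}
--     for num in lst:
--         frequency_dict[num] = frequency_dict.get(num, 0) + 1
--
--     # Create a list of unique elements in the input list
--     unique_elements = list(set(lst))
--
--     # Sort the unique elements based on their frequency in ascending order
--     sorted_elements = sorted(unique_elements, key=lambda x: (frequency_dict[x], x))
--
--     # If n is out of range, return None
--     if n < 1 or n > len(sorted_elements):
--         return None
--
--     # Return the nth rarest item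
--     return sorted_elements[n - 1]
-- ===== SOURCE B (Python) =====
-- def nth_most_rare(lst, n):
--     # Count frequencies once.
--     freq = {}
--     for num in lst:
--         freq[num] = freq.get(num, 0) + 1
--
--     items = list(freq.keys())
--     k = n - 1
--     if n < 1 or k >= len(items):
--         return None
--
--     # Quickselect the k-th smallest unique element by (frequency, value); no full sort.
--     while True:
--         pivot = items[0]
--         pk = (freq[pivot], pivot)
--         less = [x for x in items[1:] if (freq[x], x) < pk]
--         if k < len(less):
--             items = less
--         elif k == len(less):
--             return pivot
--         else:
--             items = [x for x in items[1:] if (freq[x], x) > pk]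
--             k -= len(less) + 1
-- ===== Notes on version B (the rewrite author's own statement) =====
-- stated objective: alternative
-- what changed: B replaces the full sort of the unique elements by a quickselect (recursive partition around a pivot) that finds only the n-th smallest (frequency, value) pair, iterating the counter's keys instead of building a separate set.
import Mathlib
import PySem

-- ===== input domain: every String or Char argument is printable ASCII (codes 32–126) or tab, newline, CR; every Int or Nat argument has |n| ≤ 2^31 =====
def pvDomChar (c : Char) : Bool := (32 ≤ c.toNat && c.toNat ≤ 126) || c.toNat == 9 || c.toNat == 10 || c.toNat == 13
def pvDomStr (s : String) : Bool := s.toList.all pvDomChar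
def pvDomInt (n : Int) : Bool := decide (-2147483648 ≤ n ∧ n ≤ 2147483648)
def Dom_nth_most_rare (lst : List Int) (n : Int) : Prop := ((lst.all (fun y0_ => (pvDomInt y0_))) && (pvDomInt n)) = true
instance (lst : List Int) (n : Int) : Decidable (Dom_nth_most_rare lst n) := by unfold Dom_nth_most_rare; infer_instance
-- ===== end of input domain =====

-- B selects the n-th rarest element by quickselect on (frequency, value) instead of fully sorting
-- the unique elements (alternative algorithm; no speed claim).


-- ===== PORT A =====
-- `frequency_dict[x]` in the sort key is ported as `getD x 0`: every sorted element occurs in lst,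
-- so the key is always present and the default is never read.  The sort key (freq x, x) is injective,
-- so the result does not depend on the set's iteration order.
def nth_most_rare (lst : List Int) (n : Int) : Option Int :=
  let frequency_dict :=
    lst.foldl (fun d num => d.insert num (d.getD num 0 + 1)) (PySem.Dict.empty : PySem.Dict Int Int)
  let unique_elements : List Int := PySem.Set.ofList lst
  let sorted_elements :=
    PySem.List.sorted2 unique_elements (fun x => frequency_dict.getD x 0) (fun x => x) false
  if n < 1 ∨ n > (sorted_elements.length : Int) then none
  else PySem.List.pyGet? sorted_elements (n - 1)

-- ===== PORT B =====
-- (freq[x], x) < (freq[y], y) : Python's lexicographic tuple comparison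
def pvKeyLt (freq : PySem.Dict Int Int) (x y : Int) : Bool :=
  decide (freq.getD x 0 < freq.getD y 0) ||
    (decide (freq.getD x 0 = freq.getD y 0) && decide (x < y))

-- Source B's `while True` quickselect loop, as tail recursion on (items, k)
def pvQSelect (freq : PySem.Dict Int Int) : List Int → Nat → Option Int
  | [], _ => none
  | pivot :: rest, k =>
    let less := rest.filter (fun x => pvKeyLt freq x pivot)
    if k < less.length then pvQSelect freq less k
    else if k = less.length then some pivot
    else pvQSelect freq (rest.filter (fun x => pvKeyLt freq pivot x)) (k - less.length - 1)
termination_by items _ => items.length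
decreasing_by
  all_goals
    refine Nat.lt_succ_of_le (le_trans ?_ (le_of_eq rest.length_attach))
    rw [List.length_unattach]
    exact List.length_filter_le _ _

def nth_most_rare_alt (lst : List Int) (n : Int) : Option Int :=
  let freq :=
    lst.foldl (fun d num => d.insert num (d.getD num 0 + 1)) (PySem.Dict.empty : PySem.Dict Int Int)
  let items := freq.keys
  if n < 1 ∨ n - 1 ≥ (items.length : Int) then none
  else pvQSelect freq items (n - 1).toNat

-- ===== PRECONDITION & SPEC =====
def Spec_nth_most_rare (lst : List Int) (n : Int) (out : Option Int) : Prop := out = nth_most_rare_alt lst n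
instance (lst : List Int) (n : Int) (out : Option Int) : Decidable (Spec_nth_most_rare lst n out) := by unfold Spec_nth_most_rare; infer_instance

-- ===== CLAIM (what is proved, stated in full; the proofs are below) =====
def Claim_equal_nth_most_rare : Prop := ∀ (lst : List Int) (n : Int), Dom_nth_most_rare lst n → Spec_nth_most_rare lst n (nth_most_rare lst n)

-- ===== LEMMAS AND PROOFS =====

-- the lexicographic key both programs order by
def pvKey (freq : PySem.Dict Int Int) (x : Int) : Lex (Int × Int) := toLex (freq.getD x 0, x)

lemma pvKey_injective (freq : PySem.Dict Int Int) : Function.Injective (pvKey freq) := by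
  intro a b h
  have := congrArg (fun p : Lex (Int × Int) => (ofLex p).2) h
  simpa [pvKey] using this

lemma pvKeyLt_eq (freq : PySem.Dict Int Int) (x y : Int) :
    pvKeyLt freq x y = decide (pvKey freq x < pvKey freq y) := by
  simp only [pvKeyLt, pvKey, Prod.Lex.lt_iff, ofLex_toLex]
  by_cases h1 : freq.getD x 0 < freq.getD y 0 <;>
    by_cases h2 : freq.getD x 0 = freq.getD y 0 <;>
      by_cases h3 : x < y <;> simp [h1, h2, h3]

lemma sorted2_eq_sorted_lex {α : Type} (xs : List α) (k1 k2 : α → Int) :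
    PySem.List.sorted2 xs k1 k2 false =
      PySem.List.sorted xs (fun x => toLex (k1 x, k2 x)) false := by
  have hbef : (fun a b => decide (k1 a < k1 b) || (!decide (k1 b < k1 a) && decide (k2 a < k2 b)))
      = (fun a b : α => decide ((toLex (k1 a, k2 a) : Lex (Int × Int)) < toLex (k1 b, k2 b))) := by
    funext a b
    simp only [Prod.Lex.lt_iff, ofLex_toLex]
    by_cases h1 : k1 a < k1 b <;> by_cases h2 : k1 b < k1 a <;>
      by_cases h3 : k2 a < k2 b <;> simp [h1, h2, h3] <;> omega
  simp only [PySem.List.sorted2, PySem.List.sorted, if_neg (by decide : ¬ (false = true))]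
  rw [hbef]

lemma pairwise_lt_of_nodup (freq : PySem.Dict Int Int) (l : List Int) (hnd : l.Nodup)
    (hle : l.Pairwise (fun a b => pvKey freq a ≤ pvKey freq b)) :
    l.Pairwise (fun a b => pvKey freq a < pvKey freq b) := by
  refine (hnd.and hle).imp ?_
  rintro a b ⟨hne, hle'⟩
  exact lt_of_le_of_ne hle' (fun h => hne (pvKey_injective freq h))

-- quickselect returns the k-th element of the sorted order
lemma pvQSelect_eq (freq : PySem.Dict Int Int) :
    ∀ (m : Nat) (items : List Int), items.length ≤ m → items.Nodup → ∀ (k : Nat),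
      pvQSelect freq items k =
        (PySem.List.sorted items (pvKey freq) false)[k]? := by
  intro m
  induction m with
  | zero =>
    intro items hlen _ k
    have : items = [] := List.length_eq_zero_iff.mp (Nat.le_zero.mp hlen)
    subst this
    simp [pvQSelect, PySem.List.sorted]
  | succ m ih =>
    intro items hlen hnd k
    cases items with
    | nil => simp [pvQSelect, PySem.List.sorted]
    | cons pivot rest =>
      have hrest : rest.length ≤ m := by simpa using Nat.succ_le_succ_iff.mp hlen
      have hndr : rest.Nodup := hnd.of_cons
      have hpr : pivot ∉ rest := (List.nodup_cons.mp hnd).1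
      set less := rest.filter (fun x => pvKeyLt freq x pivot) with hless
      set greater := rest.filter (fun x => pvKeyLt freq pivot x) with hgreater
      have hlessd : less = rest.filter (fun x => decide (pvKey freq x < pvKey freq pivot)) := by
        simp only [hless, pvKeyLt_eq]
      have hgreatd : greater = rest.filter (fun x => decide (pvKey freq pivot < pvKey freq x)) := by
        simp only [hgreater, pvKeyLt_eq]
      -- greater is the complement of less inside rest
      have hcompl : greater = rest.filter (fun x => !decide (pvKey freq x < pvKey freq pivot)) := by
        rw [hgreatd]
        refine List.filter_congr ?_
        intro x hx
        have hxne : pvKey freq x ≠ pvKey freq pivot := fun h =>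
          hpr (by simpa [pvKey_injective freq h] using hx)
        rcases lt_trichotomy (pvKey freq x) (pvKey freq pivot) with h | h | h
        · simp [h, not_lt_of_gt h]
        · exact absurd h hxne
        · simp [h, not_lt_of_gt h]
      have hperm : (less ++ greater).Perm rest := by
        rw [hlessd, hcompl]; exact List.filter_append_perm _ rest
      have hlessnd : less.Nodup := hndr.filter _
      have hgreatnd : greater.Nodup := hndr.filter _
      have hlesslen : less.length ≤ m := le_trans (List.length_filter_le _ _) hrest
      have hgreatlen : greater.length ≤ m := le_trans (List.length_filter_le _ _) hrest
      set SL := PySem.List.sorted less (pvKey freq) false with hSL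
      set SG := PySem.List.sorted greater (pvKey freq) false with hSG
      have hmemL : ∀ x ∈ SL, pvKey freq x < pvKey freq pivot := by
        intro x hx
        have := (PySem.List.mem_sorted (xs := less) (key := pvKey freq) (rev := false) (x := x)).mp hx
        rw [hlessd] at this
        simpa using (List.of_mem_filter this)
      have hmemG : ∀ x ∈ SG, pvKey freq pivot < pvKey freq x := by
        intro x hx
        have := (PySem.List.mem_sorted (xs := greater) (key := pvKey freq) (rev := false) (x := x)).mp hx
        rw [hgreatd] at this
        simpa using (List.of_mem_filter this)
      -- the sorted list decomposes around the pivot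
      have hsplit : PySem.List.sorted (pivot :: rest) (pvKey freq) false
          = SL ++ pivot :: SG := by
        apply PySem.List.sorted_eq_of_perm_of_pairwise_lt
        · refine List.perm_middle.trans ?_
          exact ((((PySem.List.sorted_perm _ _ _).append
            (PySem.List.sorted_perm _ _ _)).trans hperm).cons pivot)
        · rw [List.pairwise_append]
          refine ⟨?_, ?_, ?_⟩
          · exact pairwise_lt_of_nodup freq SL
              ((PySem.List.sorted_perm _ _ _).nodup_iff.mpr hlessnd)
              (PySem.List.sorted_pairwise _ _)
          · rw [List.pairwise_cons]
            exact ⟨hmemG, pairwise_lt_of_nodup freq SG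
              ((PySem.List.sorted_perm _ _ _).nodup_iff.mpr hgreatnd)
              (PySem.List.sorted_pairwise _ _)⟩
          · intro a ha b hb
            rcases List.mem_cons.mp hb with rfl | hb
            · exact hmemL a ha
            · exact lt_trans (hmemL a ha) (hmemG b hb)
      have hSLlen : SL.length = less.length := PySem.List.length_sorted _ _ _
      rw [hsplit]
      rw [pvQSelect]
      by_cases h1 : k < less.length
      · rw [if_pos h1, ih less hlesslen hlessnd k, hSL,
          List.getElem?_append_left (by omega : k < SL.length)]
      · rw [if_neg h1]
        by_cases h2 : k = less.length
        · rw [if_pos h2]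
          rw [List.getElem?_append_right (by omega : SL.length ≤ k)]
          have : k - SL.length = 0 := by omega
          simp [this]
        · rw [if_neg h2]
          rw [ih greater hgreatlen hgreatnd (k - less.length - 1),
            List.getElem?_append_right (by omega : SL.length ≤ k)]
          have : k - SL.length = (k - less.length - 1) + 1 := by omega
          rw [this, List.getElem?_cons_succ, hSG]

-- ===== VERDICT (by name: the statement is the Claim_ definition above) =====
theorem nth_most_rare_spec : Claim_equal_nth_most_rare := by
  intro lst n _
  unfold Spec_nth_most_rare nth_most_rare nth_most_rare_alt
  dsimp only
  set F := lst.foldl (fun d num => d.insert num (d.getD num 0 + 1))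
    (PySem.Dict.empty : PySem.Dict Int Int) with hF
  have hkeys : F.keys = PySem.Set.ofList lst := by
    rw [hF, PySem.Dict.keys_foldl_insert lst (fun d x => d.getD x 0 + 1) PySem.Dict.empty]
    rfl
  have hnd : (PySem.Set.ofList lst).Nodup := PySem.Set.nodup_ofList lst
  rw [hkeys, sorted2_eq_sorted_lex]
  set S := PySem.List.sorted (PySem.Set.ofList lst)
    (fun x => toLex (F.getD x 0, x)) false with hS
  have hSlen : S.length = (PySem.Set.ofList lst).length := PySem.List.length_sorted _ _ _
  by_cases hc : n < 1 ∨ n > (S.length : Int)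
  · rw [if_pos hc, if_pos (by omega)]
  · rw [not_or, not_lt, not_lt] at hc
    rw [if_neg (by omega), if_neg (by omega)]
    have h1 : (1:Int) ≤ n := hc.1
    have hnn : (0:Int) ≤ n - 1 := by omega
    have hcast : (n - 1) = (((n - 1).toNat : Nat) : Int) := (Int.toNat_of_nonneg hnn).symm
    rw [hcast, PySem.List.pyGet?_natCast]
    exact (pvQSelect_eq F (PySem.Set.ofList lst).length (PySem.Set.ofList lst) le_rfl hnd
      ((n - 1).toNat)).symm
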